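-- pv_equiv track=rewrite | github.com/openSUSE/osc2 | osc/oscargs.py | _parse_component
-- ===== SOURCE A (Python) =====
-- def _parse_component(format_entry, separators):
--     """Yields a 2 tuple.
--
--     The first entry is the left side separator and the second
--     entry is the name of the component. The left side separator
--     might be None (if the component is the first component in the
--     format_entry str).
--     format_entry is the format_entry str and separators a list
--     of component separators.
--
--     """
--     left_sep = ''
--     i = 0
--     while i < len(format_entry):
--         if format_entry[i] in separators:
--             component = format_entry[:i]
--             yield left_sep, component
--             # set new left_sep
--             left_sep = format_entry[i]
--             format_entry = format_entry[i+1:]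
--             i = 0
--         i += 1
--     # no separator left
--     yield left_sep, format_entry
-- ===== SOURCE B (Python) =====
-- def _parse_component(format_entry, separators):
--     """Yields (left-separator, component) pairs, splitting at every separator.
--
--     Walks the characters once, accumulating the current component and
--     remembering the separator that opened it.
--     """
--     seps = set(separators)
--     left_sep = ''
--     component = []
--     for c in format_entry:
--         if c in seps:
--             yield left_sep, ''.join(component)
--             left_sep = c
--             component = []
--         else:
--             component.append(c)
--     yield left_sep, ''.join(component)
-- ===== Notes on version B (the rewrite author's own statement) =====
-- stated objective: faster
-- what changed: Replaces the restart-after-slice index loop (which re-slices the remaining string at every separator and restarts the index) by a single pass over the characters accumulating the current component, with no indices or slicing.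
-- intended difference: On format strings containing two adjacent separator characters, A never inspects the character immediately after a found separator (the accidental i = 0 ... i += 1 restart) and so folds the second separator into the component (e.g. ('a,,b', [',']) gives [('','a'),(',',',b')]), while B splits at every separator ([('','a'),(',',''),(',','b')]), which is what the docstring describes. — e.g. on _parse_component("a,,b", [","]): A returns [("", "a"), (",", ",b")], B returns [("", "a"), (",", ""), (",", "b")]
import Mathlib
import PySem

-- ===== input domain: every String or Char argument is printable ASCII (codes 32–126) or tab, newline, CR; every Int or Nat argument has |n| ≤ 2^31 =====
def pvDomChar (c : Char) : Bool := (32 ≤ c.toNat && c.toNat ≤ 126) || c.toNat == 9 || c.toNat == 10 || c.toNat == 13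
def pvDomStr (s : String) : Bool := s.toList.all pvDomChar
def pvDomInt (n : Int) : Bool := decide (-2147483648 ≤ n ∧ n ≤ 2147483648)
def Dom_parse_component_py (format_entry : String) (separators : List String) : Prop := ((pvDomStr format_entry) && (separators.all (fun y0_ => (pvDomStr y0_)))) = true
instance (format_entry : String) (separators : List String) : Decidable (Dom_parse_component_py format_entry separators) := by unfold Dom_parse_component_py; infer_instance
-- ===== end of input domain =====

-- B replaces A's restart-and-reslice index loop by one character-accumulating pass (faster: O(n) vs O(n^2)).
-- Both Pythons are generators; the equivalence is about the sequence of yielded pairs.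
-- B intentionally splits at EVERY separator; A accidentally skips the character right after each
-- found separator — that difference is stated as D_ below.

-- ===== PORT A =====
-- A's while loop: on a separator at i, the prefix is yielded, the string is
-- re-sliced to the tail after the separator and i restarts at 0 (then the
-- trailing i += 1 makes it 1); otherwise i += 1.
def parse_component_loopA (fe : List Char) (i : Nat) (left_sep : String) (separators : List String) : List (String × String) :=
  if h : i < fe.length then
    if separators.contains (String.ofList [fe[i]]) then
      (left_sep, String.ofList (fe.take i)) ::
        parse_component_loopA (fe.drop (i + 1)) 1 (String.ofList [fe[i]]) separators
    else
      parse_component_loopA fe (i + 1) left_sep separators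
  else
    [(left_sep, String.ofList fe)]
termination_by fe.length - i
decreasing_by
  · simp only [List.length_drop]; omega
  · omega

def parse_component_py (format_entry : String) (separators : List String) : List (String × String) :=
  parse_component_loopA format_entry.toList 0 "" separators

-- ===== PORT B =====
-- B's for loop over the characters: a separator yields the accumulated component
-- and starts a new one; any other character is appended to the component.
def parse_component_loopB (rest : List Char) (left_sep : String) (component : List Char) (seps : PySem.Set String) : List (String × String) :=
  match rest with
  | [] => [(left_sep, String.ofList component)]
  | c :: rest' =>
    if PySem.Set.contains seps (String.ofList [c]) then
      (left_sep, String.ofList component) :: parse_component_loopB rest' (String.ofList [c]) [] seps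
    else
      parse_component_loopB rest' left_sep (component ++ [c]) seps

def parse_component_py_alt (format_entry : String) (separators : List String) : List (String × String) :=
  parse_component_loopB format_entry.toList "" [] (PySem.Set.ofList separators)

-- ===== PRECONDITION & SPEC =====
-- On format strings with two adjacent separator characters, A folds the second separator into the
-- component (it never inspects the character right after a found separator); B splits there too,
-- which is what the docstring describes.
def D_parse_component_py (format_entry : String) (separators : List String) : Prop :=
  ∃ p ∈ format_entry.toList.zip format_entry.toList.tail,
    separators.contains (String.ofList [p.1]) = true ∧ separators.contains (String.ofList [p.2]) = true
instance (format_entry : String) (separators : List String) : Decidable (D_parse_component_py format_entry separators) := by unfold D_parse_component_py; infer_instance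

def Spec_parse_component_py (format_entry : String) (separators : List String) (out : List (String × String)) : Prop := ¬ D_parse_component_py format_entry separators → out = parse_component_py_alt format_entry separators
instance (format_entry : String) (separators : List String) (out : List (String × String)) : Decidable (Spec_parse_component_py format_entry separators out) := by unfold Spec_parse_component_py; infer_instance

def pvDiffWitness_parse_component_py : String × List String := ("a,,b", [","])
def pvDiffWitnessOut_parse_component_py : (List (String × String)) × (List (String × String)) :=
  ([("", "a"), (",", ",b")], [("", "a"), (",", ""), (",", "b")])

-- ===== CLAIM (what is proved, stated in full; the proofs are below) =====
def Claim_unchanged_parse_component_py : Prop := ∀ (format_entry : String) (separators : List String), Dom_parse_component_py format_entry separators → Spec_parse_component_py format_entry separators (parse_component_py format_entry separators)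
def Claim_changed_parse_component_py : Prop := Dom_parse_component_py (pvDiffWitness_parse_component_py.1) (pvDiffWitness_parse_component_py.2) ∧ D_parse_component_py (pvDiffWitness_parse_component_py.1) (pvDiffWitness_parse_component_py.2) ∧ parse_component_py (pvDiffWitness_parse_component_py.1) (pvDiffWitness_parse_component_py.2) = pvDiffWitnessOut_parse_component_py.1 ∧ parse_component_py_alt (pvDiffWitness_parse_component_py.1) (pvDiffWitness_parse_component_py.2) = pvDiffWitnessOut_parse_component_py.2 ∧ pvDiffWitnessOut_parse_component_py.1 ≠ pvDiffWitnessOut_parse_component_py.2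

def Claim_exact_parse_component_py : Prop := ∀ (format_entry : String) (separators : List String), Dom_parse_component_py format_entry separators → D_parse_component_py format_entry separators → parse_component_py format_entry separators ≠ parse_component_py_alt format_entry separators

-- ===== LEMMAS AND PROOFS =====

-- Membership in set(separators) agrees with membership in the list.
theorem set_contains_eq (separators : List String) (x : String) :
    PySem.Set.contains (PySem.Set.ofList separators) x = separators.contains x := by
  by_cases hx : x ∈ separators <;>
    simp [PySem.Set.contains, PySem.Set.mem_ofList, hx]

-- Proof-side predicate: no two adjacent characters are both separators.
def NoAdjSep (sep : Char → Bool) : List Char → Prop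
  | [] => True
  | [_] => True
  | a :: b :: t => ¬(sep a = true ∧ sep b = true) ∧ NoAdjSep sep (b :: t)

theorem noAdjSep_tail (sep : Char → Bool) (l : List Char) (h : NoAdjSep sep l) :
    NoAdjSep sep l.tail := by
  match l with
  | [] => trivial
  | [_] => trivial
  | a :: b :: t => exact h.2

theorem noAdjSep_drop (sep : Char → Bool) (l : List Char) (h : NoAdjSep sep l) :
    ∀ i, NoAdjSep sep (l.drop i) := by
  intro i
  induction i generalizing l with
  | zero => exact h
  | succ n ih =>
    have : l.drop (n + 1) = (l.tail).drop n := by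
      rw [← List.drop_one, List.drop_drop, Nat.add_comm]
    rw [this]
    exact ih l.tail (noAdjSep_tail sep l h)

-- ¬D_ gives NoAdjSep on the character list.
theorem noAdjSep_of_forall_zip (sep : Char → Bool) :
    ∀ l : List Char, (∀ p ∈ l.zip l.tail, ¬(sep p.1 = true ∧ sep p.2 = true)) →
      NoAdjSep sep l
  | [] => fun _ => trivial
  | [_] => fun _ => trivial
  | a :: b :: t => fun h =>
      ⟨h (a, b) (by simp), noAdjSep_of_forall_zip sep (b :: t)
        (fun p hp => h p (by simpa using Or.inr hp))⟩

-- Invariant: A's loop on `fe` at index `i` (the characters before i are non-separators,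
-- no adjacent separator pair anywhere in fe) equals B's loop with the prefix fe.take i
-- already accumulated as the current component.
theorem loopA_eq_loopB (separators : List String) :
    ∀ (fe : List Char) (i : Nat) (left_sep : String),
      NoAdjSep (fun c => separators.contains (String.ofList [c])) fe →
      (∀ c ∈ fe.take i, separators.contains (String.ofList [c]) ≠ true) →
      parse_component_loopA fe i left_sep separators =
        parse_component_loopB (fe.drop i) left_sep (fe.take i) (PySem.Set.ofList separators) := by
  intro fe i left_sep
  induction fe, i, left_sep using parse_component_loopA.induct (separators := separators) with
  | case1 fe i left_sep h hsep ih =>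
    intro hD hpre
    rw [parse_component_loopA, dif_pos h, if_pos hsep]
    have hdropi : fe.drop i = fe[i] :: fe.drop (i + 1) := List.drop_eq_getElem_cons h
    rw [hdropi, parse_component_loopB, set_contains_eq, if_pos hsep]
    congr 1
    have hchain : NoAdjSep (fun c => separators.contains (String.ofList [c]))
        (fe[i] :: fe.drop (i + 1)) := hdropi ▸ noAdjSep_drop _ fe hD i
    rcases hfe' : fe.drop (i + 1) with _ | ⟨c, t⟩
    · simp [parse_component_loopA, parse_component_loopB]
    · rw [hfe'] at hchain ih
      have hcnot : separators.contains (String.ofList [c]) ≠ true :=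
        fun hc => hchain.1 ⟨hsep, hc⟩
      rw [ih hchain.2 (by intro x hx; simp at hx; subst hx; exact hcnot)]
      rw [parse_component_loopB, set_contains_eq, if_neg hcnot]
      simp
  | case2 fe i left_sep h hsep ih =>
    intro hD hpre
    rw [parse_component_loopA, dif_pos h, if_neg hsep]
    have hdropi : fe.drop i = fe[i] :: fe.drop (i + 1) := List.drop_eq_getElem_cons h
    rw [hdropi, parse_component_loopB, set_contains_eq, if_neg hsep]
    have htake : fe.take (i + 1) = fe.take i ++ [fe[i]] := by
      rw [List.take_add_one]
      simp [h]
    rw [ih hD (by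
      rw [htake]
      intro x hx
      rcases List.mem_append.mp hx with hx | hx
      · exact hpre x hx
      · simp at hx; subst hx; exact hsep)]
    rw [htake]
  | case3 fe i left_sep h =>
    intro hD hpre
    rw [parse_component_loopA, dif_neg h]
    have h1 : fe.drop i = [] := List.drop_eq_nil_of_le (by omega)
    have h2 : fe.take i = fe := List.take_of_length_le (by omega)
    rw [h1, h2, parse_component_loopB]

-- ---- Tightness: inside D_, the two outputs differ (B yields strictly more pairs) ----

-- Proof-side predicate: some two adjacent characters are both separators
-- (the same formula as D_, on the character list).
def HasAdj (sep : Char → Bool) (l : List Char) : Prop :=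
  ∃ p ∈ l.zip l.tail, sep p.1 = true ∧ sep p.2 = true

theorem hasAdj_nil (sep : Char → Bool) : ¬ HasAdj sep [] := by simp [HasAdj]

theorem hasAdj_singleton (sep : Char → Bool) (a : Char) : ¬ HasAdj sep [a] := by
  simp [HasAdj]

theorem hasAdj_cons_cons (sep : Char → Bool) (a b : Char) (t : List Char) :
    HasAdj sep (a :: b :: t) ↔ (sep a = true ∧ sep b = true) ∨ HasAdj sep (b :: t) := by
  simp [HasAdj]

-- B's loop yields one pair per separator character plus a final pair.
theorem loopB_length (separators : List String) :
    ∀ (rest : List Char) (left_sep : String) (component : List Char),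
      (parse_component_loopB rest left_sep component (PySem.Set.ofList separators)).length =
        rest.countP (fun c => separators.contains (String.ofList [c])) + 1 := by
  intro rest
  induction rest with
  | nil => intro _ _; simp [parse_component_loopB]
  | cons c t ih =>
    intro left_sep component
    rw [parse_component_loopB, set_contains_eq]
    by_cases hc : separators.contains (String.ofList [c]) = true
    · have hm : String.ofList [c] ∈ separators := by simpa using hc
      simp [hm, ih]
    · have hm : String.ofList [c] ∉ separators := by simpa using hc
      simp [hm, ih]

-- A's loop yields at most one pair per separator character remaining, plus one.
theorem loopA_length_le (separators : List String) :
    ∀ (fe : List Char) (i : Nat) (left_sep : String),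
      (parse_component_loopA fe i left_sep separators).length ≤
        (fe.drop i).countP (fun c => separators.contains (String.ofList [c])) + 1 := by
  intro fe i left_sep
  induction fe, i, left_sep using parse_component_loopA.induct (separators := separators) with
  | case1 fe i left_sep h hsep ih =>
    rw [parse_component_loopA, dif_pos h, if_pos hsep]
    have hdropi : fe.drop i = fe[i] :: fe.drop (i + 1) := List.drop_eq_getElem_cons h
    have hle : (List.drop 1 (fe.drop (i + 1))).countP
        (fun c => separators.contains (String.ofList [c])) ≤
        (fe.drop (i + 1)).countP (fun c => separators.contains (String.ofList [c])) :=
      (List.drop_sublist 1 _).countP_le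
    have hcnt : (fe.drop i).countP (fun c => separators.contains (String.ofList [c])) =
        (fe.drop (i + 1)).countP (fun c => separators.contains (String.ofList [c])) + 1 := by
      rw [hdropi, List.countP_cons]
      simp [show String.ofList [fe[i]] ∈ separators from by simpa using hsep]
    have := ih
    simp only [List.length_cons]
    omega
  | case2 fe i left_sep h hsep ih =>
    rw [parse_component_loopA, dif_pos h, if_neg hsep]
    have hdropi : fe.drop i = fe[i] :: fe.drop (i + 1) := List.drop_eq_getElem_cons h
    have hcnt : (fe.drop i).countP (fun c => separators.contains (String.ofList [c])) =
        (fe.drop (i + 1)).countP (fun c => separators.contains (String.ofList [c])) := by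
      rw [hdropi, List.countP_cons]
      simp [show String.ofList [fe[i]] ∉ separators from by simpa using hsep]
    have := ih
    omega
  | case3 fe i left_sep h =>
    rw [parse_component_loopA, dif_neg h]
    simp

-- If a separator was already skipped (in fe.take i) or an adjacent pair remains,
-- A loses at least one pair against the separator count of the whole list.
theorem loopA_length_lt (separators : List String) :
    ∀ (fe : List Char) (i : Nat) (left_sep : String),
      (HasAdj (fun c => separators.contains (String.ofList [c])) (fe.drop i) ∨
        ∃ c ∈ fe.take i, separators.contains (String.ofList [c]) = true) →
      (parse_component_loopA fe i left_sep separators).length ≤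
        fe.countP (fun c => separators.contains (String.ofList [c])) := by
  intro fe i left_sep
  induction fe, i, left_sep using parse_component_loopA.induct (separators := separators) with
  | case1 fe i left_sep h hsep ih =>
    intro hyp
    rw [parse_component_loopA, dif_pos h, if_pos hsep]
    have hdropi : fe.drop i = fe[i] :: fe.drop (i + 1) := List.drop_eq_getElem_cons h
    have hsplit : fe.countP (fun c => separators.contains (String.ofList [c])) =
        (fe.take i).countP (fun c => separators.contains (String.ofList [c])) +
        ((fe[i] :: fe.drop (i + 1)).countP (fun c => separators.contains (String.ofList [c]))) := by
      conv_lhs => rw [← List.take_append_drop i fe]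
      rw [List.countP_append, hdropi]
    simp only [List.length_cons]
    rcases hyp with hyp | hyp
    · -- an adjacent pair remains in fe.drop i = fe[i] :: fe.drop (i+1)
      rw [hdropi] at hyp
      rcases hfe' : fe.drop (i + 1) with _ | ⟨c, t⟩
      · rw [hfe'] at hyp; exact absurd hyp (hasAdj_singleton _ _)
      · rw [hfe'] at hyp ih hsplit
        have hyp' : HasAdj (fun c => separators.contains (String.ofList [c])) ((c :: t).drop 1) ∨
            ∃ x ∈ (c :: t).take 1, separators.contains (String.ofList [x]) = true := by
          rcases (hasAdj_cons_cons _ _ _ _).mp hyp with hp | hp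
          · exact Or.inr ⟨c, by simp, hp.2⟩
          · rcases t with _ | ⟨d, u⟩
            · exact absurd hp (hasAdj_singleton _ _)
            · rcases (hasAdj_cons_cons _ _ _ _).mp hp with hq | hq
              · exact Or.inr ⟨c, by simp, hq.1⟩
              · exact Or.inl hq
        have hc1 : ((fe[i] :: c :: t).countP (fun c => separators.contains (String.ofList [c]))) =
            ((c :: t).countP (fun c => separators.contains (String.ofList [c]))) + 1 := by
          rw [List.countP_cons (l := c :: t)]
          simp [show String.ofList [fe[i]] ∈ separators from by simpa using hsep]
        have := ih hyp'
        omega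
    · -- a skipped separator sits in fe.take i
      have h1 : 1 ≤ (fe.take i).countP (fun c => separators.contains (String.ofList [c])) := by
        rcases hyp with ⟨c, hc, hcs⟩
        calc 1 = [c].countP (fun c => separators.contains (String.ofList [c])) := by
              simp [show String.ofList [c] ∈ separators from by simpa using hcs]
        _ ≤ _ := (List.singleton_sublist.mpr hc).countP_le
      have h2 := loopA_length_le separators (fe.drop (i + 1)) 1 (String.ofList [fe[i]])
      have h3 : ((fe.drop (i + 1)).drop 1).countP
          (fun c => separators.contains (String.ofList [c])) ≤
          (fe.drop (i + 1)).countP (fun c => separators.contains (String.ofList [c])) :=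
        (List.drop_sublist 1 _).countP_le
      have hc1 : ((fe[i] :: fe.drop (i + 1)).countP
          (fun c => separators.contains (String.ofList [c]))) =
          ((fe.drop (i + 1)).countP (fun c => separators.contains (String.ofList [c]))) + 1 := by
        rw [List.countP_cons]
        simp [show String.ofList [fe[i]] ∈ separators from by simpa using hsep]
      omega
  | case2 fe i left_sep h hsep ih =>
    intro hyp
    rw [parse_component_loopA, dif_pos h, if_neg hsep]
    have hdropi : fe.drop i = fe[i] :: fe.drop (i + 1) := List.drop_eq_getElem_cons h
    apply ih
    rcases hyp with hyp | hyp
    · rw [hdropi] at hyp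
      rcases hfe' : fe.drop (i + 1) with _ | ⟨c, t⟩
      · rw [hfe'] at hyp; exact absurd hyp (hasAdj_singleton _ _)
      · rw [hfe'] at hyp
        rcases (hasAdj_cons_cons _ _ _ _).mp hyp with hp | hp
        · exact absurd hp.1 hsep
        · exact Or.inl hp
    · rcases hyp with ⟨c, hc, hcs⟩
      exact Or.inr ⟨c, (List.take_sublist_take_left (Nat.le_succ i)).subset hc, hcs⟩
  | case3 fe i left_sep h =>
    intro hyp
    rcases hyp with hyp | hyp
    · rw [List.drop_eq_nil_of_le (by omega)] at hyp
      exact absurd hyp (hasAdj_nil _)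
    · rw [parse_component_loopA, dif_neg h]
      rcases hyp with ⟨c, hc, hcs⟩
      have h1 : 1 ≤ fe.countP (fun c => separators.contains (String.ofList [c])) := by
        calc 1 = [c].countP (fun c => separators.contains (String.ofList [c])) := by
              simp [show String.ofList [c] ∈ separators from by simpa using hcs]
        _ ≤ _ := (List.singleton_sublist.mpr (List.mem_of_mem_take hc)).countP_le
      simpa using h1

-- ===== VERDICT (by name: the statements are the Claim_ definitions above) =====
theorem parse_component_py_spec : Claim_unchanged_parse_component_py := by
  intro format_entry separators _
  unfold Spec_parse_component_py
  intro hnd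
  unfold parse_component_py parse_component_py_alt
  have hchain : NoAdjSep (fun c => separators.contains (String.ofList [c]))
      format_entry.toList := by
    apply noAdjSep_of_forall_zip
    intro p hp hpair
    exact hnd ⟨p, hp, hpair⟩
  simpa using loopA_eq_loopB separators format_entry.toList 0 "" hchain (by simp)

theorem parse_component_py_changed : Claim_changed_parse_component_py := by
  unfold Claim_changed_parse_component_py
  refine ⟨by decide, by decide, ?_, by decide, by decide⟩
  show parse_component_py "a,,b" [","] = [("", "a"), (",", ",b")]
  simp [parse_component_py, parse_component_loopA, String.ofList]
  decide

theorem parse_component_py_tight : Claim_exact_parse_component_py := by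
  intro format_entry separators _ hD heq
  have hadj : HasAdj (fun c => separators.contains (String.ofList [c]))
      (format_entry.toList.drop 0) := by
    rw [List.drop_zero]
    exact hD
  have hA := loopA_length_lt separators format_entry.toList 0 "" (Or.inl hadj)
  have hB := loopB_length separators format_entry.toList "" []
  have hlen := congrArg List.length heq
  unfold parse_component_py parse_component_py_alt at hlen
  omega
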